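-- pv_equiv track=rewrite | github.com/deathuman/Baluffo | scripts/backup_e2e_validate.py | _diff_attachment_hashes
-- ===== SOURCE A (Python) =====
-- from typing import Any, Dict, List, Tuple
--
-- def _diff_attachment_hashes(before: Dict[str, str], after: Dict[str, str]) -> List[Dict[str, Any]]:
--     mismatches: List[Dict[str, Any]] = []
--     before_keys = set(before.keys())
--     after_keys = set(after.keys())
--     for key in sorted(before_keys - after_keys):
--         mismatches.append({"kind": "attachment_hash_missing_after_import", "key": key})
--     for key in sorted(after_keys - before_keys):
--         mismatches.append({"kind": "attachment_hash_unexpected_after_import", "key": key})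
--     for key in sorted(before_keys & after_keys):
--         if before[key] != after[key]:
--             mismatches.append(
--                 {
--                     "kind": "attachment_hash_mismatch",
--                     "key": key,
--                     "before": before[key],
--                     "after": after[key],
--                 }
--             )
--     return mismatches
-- ===== SOURCE B (Python) =====
-- from typing import Any, Dict, List
--
-- def _diff_attachment_hashes(before: Dict[str, str], after: Dict[str, str]) -> List[Dict[str, Any]]:
--     # Two-pointer merge of the two independently sorted key lists.
--     bkeys = sorted(before)
--     akeys = sorted(after)
--     missing: List[Dict[str, Any]] = []
--     unexpected: List[Dict[str, Any]] = []
--     mismatch: List[Dict[str, Any]] = []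
--     i = j = 0
--     while i < len(bkeys) and j < len(akeys):
--         bk, ak = bkeys[i], akeys[j]
--         if bk < ak:
--             missing.append({"kind": "attachment_hash_missing_after_import", "key": bk})
--             i += 1
--         elif ak < bk:
--             unexpected.append({"kind": "attachment_hash_unexpected_after_import", "key": ak})
--             j += 1
--         else:
--             if before[bk] != after[bk]:
--                 mismatch.append(
--                     {
--                         "kind": "attachment_hash_mismatch",
--                         "key": bk,
--                         "before": before[bk],
--                         "after": after[bk],
--                     }
--                 )
--             i += 1
--             j += 1
--     while i < len(bkeys):
--         missing.append({"kind": "attachment_hash_missing_after_import", "key": bkeys[i]})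
--         i += 1
--     while j < len(akeys):
--         unexpected.append({"kind": "attachment_hash_unexpected_after_import", "key": akeys[j]})
--         j += 1
--     return missing + unexpected + mismatch
-- ===== Notes on version B (the rewrite author's own statement) =====
-- stated objective: alternative
-- what changed: A builds key sets and makes three separate passes over sorted set difference/difference/intersection; B sorts the two key lists independently and runs a single two-pointer merge over them, classifying each key into missing/unexpected/mismatch as the pointers advance, then concatenates the three blocks.
import Mathlib
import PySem

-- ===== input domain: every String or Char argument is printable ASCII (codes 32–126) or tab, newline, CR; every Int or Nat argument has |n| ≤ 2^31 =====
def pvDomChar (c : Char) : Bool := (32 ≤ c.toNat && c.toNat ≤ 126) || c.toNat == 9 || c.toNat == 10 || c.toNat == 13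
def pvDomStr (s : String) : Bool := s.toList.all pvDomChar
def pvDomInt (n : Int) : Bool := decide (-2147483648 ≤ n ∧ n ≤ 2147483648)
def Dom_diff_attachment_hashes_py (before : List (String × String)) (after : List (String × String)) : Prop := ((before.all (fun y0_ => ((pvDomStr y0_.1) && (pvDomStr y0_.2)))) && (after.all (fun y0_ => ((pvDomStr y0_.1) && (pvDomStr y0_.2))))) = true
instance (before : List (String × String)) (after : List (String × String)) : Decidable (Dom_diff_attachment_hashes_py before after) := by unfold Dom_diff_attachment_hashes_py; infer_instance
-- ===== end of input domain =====

-- B replaces A's three passes over set difference/difference/intersection by one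
-- two-pointer merge of the two independently sorted key lists (alternative algorithm, same cost).

-- ===== PORT A =====
-- the three record builders ({"kind": …, "key": …} dicts as association lists)
def pvMissingItem (k : String) : List (String × String) :=
  [("kind", "attachment_hash_missing_after_import"), ("key", k)]
def pvUnexpectedItem (k : String) : List (String × String) :=
  [("kind", "attachment_hash_unexpected_after_import"), ("key", k)]
def pvMismatchItem (bv av k : String) : List (String × String) :=
  [("kind", "attachment_hash_mismatch"), ("key", k), ("before", bv), ("after", av)]

def diff_attachment_hashes_py (before : List (String × String)) (after : List (String × String)) : List (List (String × String)) :=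
  let bd := PySem.Dict.mk before
  let ad := PySem.Dict.mk after
  let before_keys : PySem.Set String := PySem.Set.ofList bd.keys
  let after_keys : PySem.Set String := PySem.Set.ofList ad.keys
  let mismatches : List (List (String × String)) :=
    (PySem.List.sorted (PySem.Set.diff before_keys after_keys) (fun k => k)).foldl
      (fun acc key => acc ++ [pvMissingItem key]) []
  let mismatches :=
    (PySem.List.sorted (PySem.Set.diff after_keys before_keys) (fun k => k)).foldl
      (fun acc key => acc ++ [pvUnexpectedItem key]) mismatches
  let mismatches :=
    (PySem.List.sorted (PySem.Set.inter before_keys after_keys) (fun k => k)).foldl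
      (fun acc key =>
        -- before[key]/after[key]: the key is in both dicts here, so getD with default "" is exact
        if (bd.getD key "" != ad.getD key "") then acc ++ [pvMismatchItem (bd.getD key "") (ad.getD key "") key] else acc)
      mismatches
  mismatches

-- ===== PORT B =====
-- the two-pointer merge loop of Source B: structural recursion on the two sorted key lists
-- (advancing a pointer = recursing on that list's tail); the trailing drain loops are the
-- one-sided base cases.
def pvMerge (bd ad : PySem.Dict String String) :
    List String → List String →
    List (List (String × String)) × List (List (String × String)) × List (List (String × String))
  | [], akeys => ([], akeys.map pvUnexpectedItem, [])
  | bk :: bt, [] => ((bk :: bt).map pvMissingItem, [], [])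
  | bk :: bt, ak :: at_ =>
    if bk < ak then
      let r := pvMerge bd ad bt (ak :: at_)
      (pvMissingItem bk :: r.1, r.2.1, r.2.2)
    else if ak < bk then
      let r := pvMerge bd ad (bk :: bt) at_
      (r.1, pvUnexpectedItem ak :: r.2.1, r.2.2)
    else
      let r := pvMerge bd ad bt at_
      -- before[bk]/after[bk]: bk is a key of both dicts here, so getD with default "" is exact
      if (bd.getD bk "" != ad.getD bk "") then
        (r.1, r.2.1, pvMismatchItem (bd.getD bk "") (ad.getD bk "") bk :: r.2.2)
      else r
  termination_by bs as => bs.length + as.length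

def diff_attachment_hashes_py_alt (before : List (String × String)) (after : List (String × String)) : List (List (String × String)) :=
  let bd := PySem.Dict.mk before
  let ad := PySem.Dict.mk after
  let bkeys := PySem.List.sorted bd.keys (fun k => k)
  let akeys := PySem.List.sorted ad.keys (fun k => k)
  let tri := pvMerge bd ad bkeys akeys
  tri.1 ++ tri.2.1 ++ tri.2.2

-- ===== PRECONDITION & SPEC =====
-- Pre_: the association lists represent Python dicts, whose keys are distinct; a duplicate
-- key never arises from a Python dict argument, so nothing A returns on is excluded.
def Pre_diff_attachment_hashes_py (before : List (String × String)) (after : List (String × String)) : Prop :=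
  (before.map Prod.fst).Nodup ∧ (after.map Prod.fst).Nodup
instance (before : List (String × String)) (after : List (String × String)) : Decidable (Pre_diff_attachment_hashes_py before after) := by unfold Pre_diff_attachment_hashes_py; infer_instance
def pvWitness_diff_attachment_hashes_py : (List (String × String)) × (List (String × String)) :=
  ([("a", "x"), ("b", "y")], [("a", "z")])
def Spec_diff_attachment_hashes_py (before : List (String × String)) (after : List (String × String)) (out : List (List (String × String))) : Prop := out = diff_attachment_hashes_py_alt before after
instance (before : List (String × String)) (after : List (String × String)) (out : List (List (String × String))) : Decidable (Spec_diff_attachment_hashes_py before after out) := by unfold Spec_diff_attachment_hashes_py; infer_instance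

-- ===== CLAIM (what is proved, stated in full; the proofs are below) =====
def Claim_equal_diff_attachment_hashes_py : Prop := ∀ (before : List (String × String)) (after : List (String × String)), Dom_diff_attachment_hashes_py before after → Pre_diff_attachment_hashes_py before after → Spec_diff_attachment_hashes_py before after (diff_attachment_hashes_py before after)

-- ===== LEMMAS AND PROOFS =====

-- the merge of two strictly increasing key lists is the three filtered-and-mapped blocks
theorem pvMerge_eq (bd ad : PySem.Dict String String) (xs ys : List String)
    (hx : xs.Pairwise (· < ·)) (hy : ys.Pairwise (· < ·)) :
    pvMerge bd ad xs ys =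
      ((xs.filter (fun k => !(ys.contains k))).map pvMissingItem,
       (ys.filter (fun k => !(xs.contains k))).map pvUnexpectedItem,
       ((xs.filter (fun k => ys.contains k)).filter
          (fun k => bd.getD k "" != ad.getD k "")).map
         (fun k => pvMismatchItem (bd.getD k "") (ad.getD k "") k)) := by
  fun_induction pvMerge bd ad xs ys with
  | case1 akeys =>
    simp
  | case2 bk bt =>
    simp
  | case3 bk bt ak at_ hlt r ih =>
    subst r
    rw [ih (List.Pairwise.of_cons hx) hy]
    have h1 : bk ≠ ak := ne_of_lt hlt
    have h2 : bk ∉ at_ := fun h =>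
      absurd (lt_trans hlt (List.rel_of_pairwise_cons hy h)) (lt_irrefl bk)
    have hne : ∀ k ∈ ak :: at_, ¬ k = bk := by
      intro k hk heq
      subst heq
      rcases List.mem_cons.mp hk with h | h
      · exact h1 h
      · exact h2 h
    simp only [Prod.mk.injEq]
    refine ⟨?_, ?_, ?_⟩
    · simp [h1, h2]
    · exact congrArg (List.map _) (List.filter_congr fun k hk => by simp [hne k hk])
    · simp [h1, h2]
  | case4 bk bt ak at_ hnlt hlt r ih =>
    subst r
    rw [ih hx (List.Pairwise.of_cons hy)]
    have h1 : ak ≠ bk := ne_of_lt hlt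
    have h2 : ak ∉ bt := fun h =>
      absurd (lt_trans hlt (List.rel_of_pairwise_cons hx h)) (lt_irrefl ak)
    have hne : ∀ k ∈ bk :: bt, ¬ k = ak := by
      intro k hk heq
      subst heq
      rcases List.mem_cons.mp hk with h | h
      · exact h1 h
      · exact h2 h
    simp only [Prod.mk.injEq]
    refine ⟨?_, ?_, ?_⟩
    · exact congrArg (List.map _) (List.filter_congr fun k hk => by simp [hne k hk])
    · simp [h1, h2]
    · exact congrArg (List.map _) (congrArg (List.filter _)
        (List.filter_congr fun k hk => by simp [hne k hk]))
  | case5 bk bt ak at_ hnlt1 hnlt2 r hv ih =>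
    have heq : ak = bk := le_antisymm (not_lt.mp hnlt1) (not_lt.mp hnlt2)
    subst heq
    subst r
    rw [ih (List.Pairwise.of_cons hx) (List.Pairwise.of_cons hy)]
    have hgt_b : ∀ k ∈ bt, ¬ k = ak := fun k hk heq =>
      absurd (heq ▸ List.rel_of_pairwise_cons hx hk) (lt_irrefl ak)
    have hgt_a : ∀ k ∈ at_, ¬ k = ak := fun k hk heq =>
      absurd (heq ▸ List.rel_of_pairwise_cons hy hk) (lt_irrefl ak)
    simp only [Prod.mk.injEq]
    refine ⟨?_, ?_, ?_⟩
    · rw [List.filter_cons]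
      simp only [List.contains_cons, BEq.rfl, Bool.true_or, Bool.not_true, Bool.false_eq_true,
        if_false]
      exact congrArg (List.map _) (List.filter_congr fun k hk => by simp [hgt_b k hk])
    · rw [List.filter_cons]
      simp only [List.contains_cons, BEq.rfl, Bool.true_or, Bool.not_true, Bool.false_eq_true,
        if_false]
      exact congrArg (List.map _) (List.filter_congr fun k hk => by simp [hgt_a k hk])
    · rw [List.filter_cons]
      simp only [List.contains_cons, BEq.rfl, Bool.true_or, if_true]
      rw [List.filter_cons, hv, if_pos rfl]
      exact congrArg (fun l => pvMismatchItem (bd.getD ak "") (ad.getD ak "") ak ::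
          List.map (fun k => pvMismatchItem (bd.getD k "") (ad.getD k "") k) l)
        (congrArg (List.filter _) (List.filter_congr fun k hk => by simp [hgt_b k hk]))
  | case6 bk bt ak at_ hnlt1 hnlt2 r hv ih =>
    have heq : ak = bk := le_antisymm (not_lt.mp hnlt1) (not_lt.mp hnlt2)
    subst heq
    subst r
    rw [ih (List.Pairwise.of_cons hx) (List.Pairwise.of_cons hy)]
    have hgt_b : ∀ k ∈ bt, ¬ k = ak := fun k hk heq =>
      absurd (heq ▸ List.rel_of_pairwise_cons hx hk) (lt_irrefl ak)
    have hgt_a : ∀ k ∈ at_, ¬ k = ak := fun k hk heq =>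
      absurd (heq ▸ List.rel_of_pairwise_cons hy hk) (lt_irrefl ak)
    simp only [Prod.mk.injEq]
    refine ⟨?_, ?_, ?_⟩
    · rw [List.filter_cons]
      simp only [List.contains_cons, BEq.rfl, Bool.true_or, Bool.not_true, Bool.false_eq_true,
        if_false]
      exact congrArg (List.map _) (List.filter_congr fun k hk => by simp [hgt_b k hk])
    · rw [List.filter_cons]
      simp only [List.contains_cons, BEq.rfl, Bool.true_or, Bool.not_true, Bool.false_eq_true,
        if_false]
      exact congrArg (List.map _) (List.filter_congr fun k hk => by simp [hgt_a k hk])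
    · rw [List.filter_cons]
      simp only [List.contains_cons, BEq.rfl, Bool.true_or, if_true]
      rw [List.filter_cons, if_neg hv]
      exact congrArg (List.map _) (congrArg (List.filter _)
        (List.filter_congr fun k hk => by simp [hgt_b k hk]))

-- a strictly increasing list filtered from a sorted key list IS sorted(s) for the matching
-- key set s
theorem sorted_eq_filter_sorted (u s : List String) (p : String → Bool)
    (hu : u.Nodup) (hs : s.Nodup) (h : ∀ k, k ∈ s ↔ k ∈ u ∧ p k = true) :
    PySem.List.sorted s (fun x => x) = (PySem.List.sorted u (fun x => x)).filter p := by
  have hperm : (PySem.List.sorted u (fun x => x)).Perm u := PySem.List.sorted_perm u _ false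
  have hnodup : (PySem.List.sorted u (fun x => x)).Nodup := (hperm.nodup_iff).mpr hu
  have hlt : (PySem.List.sorted u (fun x => x)).Pairwise (· < ·) := by
    have hle := PySem.List.sorted_pairwise u (fun x => x)
    exact (hle.and hnodup).imp (fun ⟨a, b⟩ => lt_of_le_of_ne a b)
  apply PySem.List.sorted_eq_of_perm_of_pairwise_lt
  · rw [List.perm_ext_iff_of_nodup (hnodup.filter p) hs]
    intro a
    rw [List.mem_filter, hperm.mem_iff, h a]
  · exact hlt.filter p

-- sorted dict keys are strictly increasing
theorem sorted_keys_pairwise_lt (u : List String) (hu : u.Nodup) :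
    (PySem.List.sorted u (fun x => x)).Pairwise (· < ·) := by
  have hperm : (PySem.List.sorted u (fun x => x)).Perm u := PySem.List.sorted_perm u _ false
  have hnodup : (PySem.List.sorted u (fun x => x)).Nodup := (hperm.nodup_iff).mpr hu
  have hle := PySem.List.sorted_pairwise u (fun x => x)
  exact (hle.and hnodup).imp (fun ⟨a, b⟩ => lt_of_le_of_ne a b)


-- ===== VERDICT (by name: the statement is the Claim_ definition above) =====
theorem diff_attachment_hashes_py_spec : Claim_equal_diff_attachment_hashes_py := by
  intro before after _ hpre
  unfold Spec_diff_attachment_hashes_py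
  simp only [diff_attachment_hashes_py, diff_attachment_hashes_py_alt]
  set bd := PySem.Dict.mk before with hbd
  set ad := PySem.Dict.mk after with had
  set bk : PySem.Set String := PySem.Set.ofList bd.keys with hbk
  set ak : PySem.Set String := PySem.Set.ofList ad.keys with hak
  have hbn : bd.keys.Nodup := by simpa [PySem.Dict.keys, hbd, PySem.Dict.mk] using hpre.1
  have han : ad.keys.Nodup := by simpa [PySem.Dict.keys, had, PySem.Dict.mk] using hpre.2
  rw [pvMerge_eq bd ad _ _ (sorted_keys_pairwise_lt _ hbn) (sorted_keys_pairwise_lt _ han)]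
  rw [PySem.List.foldl_append_singleton_eq_map, PySem.List.foldl_append_singleton_eq_map,
      PySem.List.foldl_append_if]
  simp only [List.nil_append]
  have h1 : PySem.List.sorted (PySem.Set.diff bk ak) (fun k => k)
      = (PySem.List.sorted bd.keys (fun k => k)).filter
          (fun key => !((PySem.List.sorted ad.keys (fun k => k)).contains key)) := by
    apply sorted_eq_filter_sorted _ _ _ hbn (PySem.Set.nodup_diff bk ak (PySem.Set.nodup_ofList _))
    intro k
    simp [hbk, hak, PySem.Set.mem_diff, PySem.Set.mem_ofList, PySem.List.mem_sorted]
  have h2 : PySem.List.sorted (PySem.Set.diff ak bk) (fun k => k)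
      = (PySem.List.sorted ad.keys (fun k => k)).filter
          (fun key => !((PySem.List.sorted bd.keys (fun k => k)).contains key)) := by
    apply sorted_eq_filter_sorted _ _ _ han (PySem.Set.nodup_diff ak bk (PySem.Set.nodup_ofList _))
    intro k
    simp [hbk, hak, PySem.Set.mem_diff, PySem.Set.mem_ofList, PySem.List.mem_sorted]
  have h3 : PySem.List.sorted (PySem.Set.inter bk ak) (fun k => k)
      = (PySem.List.sorted bd.keys (fun k => k)).filter
          (fun key => (PySem.List.sorted ad.keys (fun k => k)).contains key) := by
    apply sorted_eq_filter_sorted _ _ _ hbn (PySem.Set.nodup_inter bk ak (PySem.Set.nodup_ofList _))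
    intro k
    simp [hbk, hak, PySem.Set.mem_inter, PySem.Set.mem_ofList, PySem.List.mem_sorted]
  rw [h1, h2, h3, List.append_assoc]
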